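-- pv_equiv track=rewrite | github.com/haddocking/haddock3 | tools/capri-evaluate.py | retrieve_izone
-- ===== SOURCE A (Python) =====
-- from _operator import itemgetter
-- from itertools import groupby
--
-- def get_range(data):
-- 	ranges = []
-- 	for k, g in groupby(enumerate(data), lambda x: x[0] - x[1]):
-- 		group = (map(itemgetter(1), g))
-- 		group = list(map(int, group))
-- 		ranges.append((group[0], group[-1]))
-- 	return ranges
--
-- def retrieve_izone(c_dic, numbering_dic):
-- 	# based on the reference interface, create izone
-- 	izone_l = []
-- 	for chain in c_dic:
-- 		ref_dic = {}
-- 		for bound_res in list(c_dic[chain].items())[0][1]: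
-- 			try:
-- 				ub = numbering_dic[chain][bound_res]
-- 				ref_dic[bound_res] = ub
-- 			except KeyError:
-- 				pass
--
-- 		for bound_range in get_range(ref_dic.keys()):
-- 			unbound_res_l = []
-- 			for bound_res in range(bound_range[0], bound_range[1] + 1):
-- 				unbound_res_l.append(ref_dic[bound_res])
--
-- 			for unbound_range in get_range(unbound_res_l):
-- 				bound_res_l = []
-- 				for unbound_res in range(unbound_range[0], unbound_range[1] + 1):
-- 					bound_res_l.append(list(ref_dic.keys())[list(ref_dic.values()).index(unbound_res)])
--
-- 				range_a = get_range(bound_res_l)[0]  # bound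
-- 				range_b = unbound_range
--
-- 				izone_str = 'ZONE %s%i-%s%i:%s%i-%s%i' % (
-- 					chain, range_a[0], chain, range_a[1], chain, range_b[0], chain, range_b[1])
-- 				izone_l.append(izone_str)
--
-- 	return izone_l
-- ===== SOURCE B (Python) =====
-- def retrieve_izone(c_dic, numbering_dic):
-- 	# One pass over ref_dic's ordered (bound, unbound) pairs to find the runs, plus a
-- 	# first-occurrence value->key dict, instead of A's three stacked get_range passes
-- 	# with a reverse list.index scan per residue.
-- 	izone_l = []
-- 	for chain in c_dic:
-- 		ref_dic = {}
-- 		for bound_res in list(c_dic[chain].items())[0][1]: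
-- 			try:
-- 				ref_dic[bound_res] = numbering_dic[chain][bound_res]
-- 			except KeyError:
-- 				pass
--
-- 		first_key = {}
-- 		for b, u in ref_dic.items():
-- 			if u not in first_key:
-- 				first_key[u] = b
--
-- 		pairs = list(ref_dic.items())
-- 		if not pairs:
-- 			continue
-- 		runs = []
-- 		u0 = pairs[0][1]
-- 		bp, up = pairs[0]
-- 		for b, u in pairs[1:]:
-- 			if b - bp != 1 or u - up != 1:
-- 				runs.append((u0, up))
-- 				u0 = u
-- 			bp, up = b, u
-- 		runs.append((u0, up))
--
-- 		for ua, ub in runs: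
-- 			a0 = first_key[ua]
-- 			ae = a0
-- 			u = ua
-- 			while u < ub and first_key.get(u + 1) == ae + 1:
-- 				u += 1
-- 				ae += 1
-- 			izone_l.append('ZONE %s%i-%s%i:%s%i-%s%i' % (
-- 				chain, a0, chain, ae, chain, ua, chain, ub))
-- 	return izone_l
-- ===== Notes on version B (the rewrite author's own statement) =====
-- stated objective: alternative
-- what changed: Instead of A's three stacked get_range/groupby passes with a reverse list.index scan and key/value list rebuild per residue, B splits the runs in one pass over ref_dic's ordered (bound, unbound) pairs and resolves each run's bound range through a prebuilt first-occurrence value->key dict.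
import Mathlib
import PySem

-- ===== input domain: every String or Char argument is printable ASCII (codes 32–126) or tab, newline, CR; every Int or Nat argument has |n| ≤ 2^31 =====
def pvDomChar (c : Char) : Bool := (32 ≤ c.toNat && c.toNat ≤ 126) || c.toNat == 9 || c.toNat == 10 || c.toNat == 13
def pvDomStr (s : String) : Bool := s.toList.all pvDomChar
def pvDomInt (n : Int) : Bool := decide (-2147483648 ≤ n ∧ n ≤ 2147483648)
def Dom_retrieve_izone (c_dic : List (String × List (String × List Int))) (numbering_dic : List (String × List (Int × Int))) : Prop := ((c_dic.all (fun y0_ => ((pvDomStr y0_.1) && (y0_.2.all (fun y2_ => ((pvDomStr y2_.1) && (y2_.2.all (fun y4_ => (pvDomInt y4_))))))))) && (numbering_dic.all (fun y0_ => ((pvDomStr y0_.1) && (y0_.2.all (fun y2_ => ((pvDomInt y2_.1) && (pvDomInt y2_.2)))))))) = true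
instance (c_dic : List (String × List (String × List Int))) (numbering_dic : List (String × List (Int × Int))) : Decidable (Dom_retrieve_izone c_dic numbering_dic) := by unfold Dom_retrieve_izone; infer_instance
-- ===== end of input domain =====

-- B replaces A's three stacked get_range passes and per-residue reverse list.index scans
-- with one pass over ref_dic's ordered (bound, unbound) pairs plus a prebuilt
-- first-occurrence value->key dict; equivalence is proved on inputs where every chain's
-- inner dict is nonempty (elsewhere A raises IndexError).

-- ===== PORT A =====
-- the shared '%'-format string 'ZONE %s%i-%s%i:%s%i-%s%i' (both Pythons use this literal format)
def pvZone (chain : String) (a1 a2 b1 b2 : Int) : String :=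
  "ZONE " ++ chain ++ PySem.Int.toStr a1 ++ "-" ++ chain ++ PySem.Int.toStr a2 ++ ":" ++
    chain ++ PySem.Int.toStr b1 ++ "-" ++ chain ++ PySem.Int.toStr b2

-- hand port (exact) of groupby(enumerate(data), lambda x: x[0] - x[1]) collecting
-- (group[0], group[-1]) per group: k is the current group key, first/last the group ends
def getRangeAux : Int → Int → Int → List (Int × Int) → List (Int × Int)
  | _, first, last, [] => [(first, last)]
  | k, first, last, (i, x) :: rest =>
      if i - x = k then getRangeAux k first x rest
      else (first, last) :: getRangeAux (i - x) x x rest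

def getRange (data : List Int) : List (Int × Int) :=
  match PySem.List.enumerate data with
  | [] => []
  | (i, x) :: rest => getRangeAux (i - x) x x rest

-- numbering_dic[chain][bound_res]; none exactly where Python raises KeyError (caught in both Pythons)
def lookupNum (numbering_dic : List (String × List (Int × Int))) (chain : String) (b : Int) : Option Int :=
  match (PySem.Dict.ofList numbering_dic).get? chain with
  | none => none
  | some num => (PySem.Dict.ofList num).get? b

-- the ref_dic building loop (textually identical in A and in B)
def buildRef (numbering_dic : List (String × List (Int × Int))) (chain : String) (bound_list : List Int) : PySem.Dict Int Int :=
  bound_list.foldl (fun rd b =>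
    match lookupNum numbering_dic chain b with
    | none => rd
    | some ub => rd.insert b ub) PySem.Dict.empty

-- body of A's innermost loop (one unbound_range); list.index / list[i] defaults are
-- unreachable there (the value is always present); getD 0 stands for ref_dic[...] whose
-- KeyError cannot fire on the ranges A builds
def bodyU (d : PySem.Dict Int Int) (chain : String) (iz2 : List String) (ur : Int × Int) : List String :=
  let bound_res_l := (PySem.List.pyRange ur.1 (ur.2 + 1)).foldl
      (fun l u => l ++ [d.keys.getD ((PySem.List.index? d.values u).getD 0) 0]) []
  let range_a := (getRange bound_res_l).headD (0, 0)
  iz2 ++ [pvZone chain range_a.1 range_a.2 ur.1 ur.2]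

-- body of A's middle loop (one bound_range)
def bodyK (d : PySem.Dict Int Int) (chain : String) (iz1 : List String) (br : Int × Int) : List String :=
  let unbound_res_l := (PySem.List.pyRange br.1 (br.2 + 1)).foldl (fun l b => l ++ [d.getD b 0]) []
  (getRange unbound_res_l).foldl (bodyU d chain) iz1

-- headD ("", []) stands for list(...)[0] which raises IndexError on an empty inner dict
-- (excluded by Pre_)
def retrieve_izone (c_dic : List (String × List (String × List Int))) (numbering_dic : List (String × List (Int × Int))) : List String :=
  (PySem.Dict.ofList c_dic).items.foldl (fun izone_l ci =>
    let ref_dic := buildRef numbering_dic ci.1 ((PySem.Dict.ofList ci.2).items.headD ("", [])).2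
    (getRange ref_dic.keys).foldl (bodyK ref_dic ci.1) izone_l) []

-- ===== PORT B =====
-- B's first-occurrence value -> key dict ('if u not in first_key: first_key[u] = b')
def firstKey (pairs : List (Int × Int)) : PySem.Dict Int Int :=
  pairs.foldl (fun m p => if m.contains p.2 then m else m.insert p.2 p.1) PySem.Dict.empty

-- B's run-splitting pass: u0 opens the current run, (bp, up) is the previous pair
def runsLoop (u0 bp up : Int) : List (Int × Int) → List (Int × Int)
  | [] => [(u0, up)]
  | (b, u) :: rest =>
      if b - bp ≠ 1 ∨ u - up ≠ 1 then (u0, up) :: runsLoop u b u rest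
      else runsLoop u0 b u rest

-- B's 'while u < ub and first_key.get(u+1) == ae+1' loop: it runs at most (ub - u) times,
-- ported as structural recursion on that count ('None == ae+1' is the 'none ≠ some _' case)
def scanEnd (m : PySem.Dict Int Int) (ae u : Int) : Nat → Int
  | 0 => ae
  | Nat.succ k => if m.get? (u + 1) = some (ae + 1) then scanEnd m (ae + 1) (u + 1) k else ae

-- headD/getD defaults stand for the IndexError excluded by Pre_ and a KeyError that
-- cannot fire (every run value is a first_key key)
def retrieve_izone_alt (c_dic : List (String × List (String × List Int))) (numbering_dic : List (String × List (Int × Int))) : List String :=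
  (PySem.Dict.ofList c_dic).items.foldl (fun izone_l ci =>
    let ref_dic := buildRef numbering_dic ci.1 ((PySem.Dict.ofList ci.2).items.headD ("", [])).2
    let first_key := firstKey ref_dic.items
    match ref_dic.items with
    | [] => izone_l
    | p :: rest =>
        (runsLoop p.2 p.1 p.2 rest).foldl (fun iz r =>
          let a0 := first_key.getD r.1 0
          iz ++ [pvZone ci.1 a0 (scanEnd first_key a0 r.1 (r.2 - r.1).toNat) r.1 r.2]) izone_l) []

-- ===== PRECONDITION & SPEC =====
-- Pre_ excludes exactly the chains with an empty inner dict, where A raises IndexError at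
-- list(c_dic[chain].items())[0].
def Pre_retrieve_izone (c_dic : List (String × List (String × List Int))) (numbering_dic : List (String × List (Int × Int))) : Prop :=
  ∀ p ∈ (PySem.Dict.ofList c_dic).items, p.2 ≠ []
instance (c_dic : List (String × List (String × List Int))) (numbering_dic : List (String × List (Int × Int))) : Decidable (Pre_retrieve_izone c_dic numbering_dic) := by unfold Pre_retrieve_izone; infer_instance

def pvWitness_retrieve_izone : (List (String × List (String × List Int))) × (List (String × List (Int × Int))) :=
  ([("A", [("x", [1, 2, 5])]), ("B", [("y", [3, 4])])],
   [("A", [(1, 7), (2, 8), (5, 40)]), ("B", [(3, 11), (4, 12)])])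

def Spec_retrieve_izone (c_dic : List (String × List (String × List Int))) (numbering_dic : List (String × List (Int × Int))) (out : List String) : Prop := out = retrieve_izone_alt c_dic numbering_dic
instance (c_dic : List (String × List (String × List Int))) (numbering_dic : List (String × List (Int × Int))) (out : List String) : Decidable (Spec_retrieve_izone c_dic numbering_dic out) := by unfold Spec_retrieve_izone; infer_instance

-- ===== CLAIM (what is proved, stated in full; the proofs are below) =====
def Claim_equal_retrieve_izone : Prop := ∀ (c_dic : List (String × List (String × List Int))) (numbering_dic : List (String × List (Int × Int))), Dom_retrieve_izone c_dic numbering_dic → Pre_retrieve_izone c_dic numbering_dic → Spec_retrieve_izone c_dic numbering_dic (retrieve_izone c_dic numbering_dic)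

-- ===== LEMMAS AND PROOFS =====

-- the (start, end) pairs of B's runs, and the zone string of one run
def runsB (s e : Int × Int) : List (Int × Int) → List ((Int × Int) × (Int × Int))
  | [] => [(s, e)]
  | q :: rest =>
      if q.1 - e.1 ≠ 1 ∨ q.2 - e.2 ≠ 1 then (s, e) :: runsB q q rest else runsB s q rest

def zonesRuns : List (Int × Int) → List ((Int × Int) × (Int × Int))
  | [] => []
  | p :: rest => runsB p p rest

-- adjacency relations: bound step of 1 / both steps of 1
def adjK (p q : Int × Int) : Prop := q.1 = p.1 + 1
def adj2 (p q : Int × Int) : Prop := q.1 = p.1 + 1 ∧ q.2 = p.2 + 1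

-- maximal run splitter: p :: (takeRunT adj p l).1 is the maximal adj-run prefix of p :: l
def takeRunT (adj : (Int × Int) → (Int × Int) → Bool) : (Int × Int) → List (Int × Int) → List (Int × Int) × List (Int × Int)
  | _, [] => ([], [])
  | p, q :: l => if adj p q then ((q :: (takeRunT adj q l).1), (takeRunT adj q l).2) else ([], q :: l)

lemma takeRunT_append (adj) : ∀ (l : List (Int × Int)) (p), (takeRunT adj p l).1 ++ (takeRunT adj p l).2 = l := by
  intro l
  induction l with
  | nil => intro p; simp [takeRunT]
  | cons q t ih =>
      intro p
      by_cases h : adj p q = true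
      · simp [takeRunT, h, ih q]
      · simp [takeRunT, h]


lemma takeRunT_chain (adj) : ∀ (l : List (Int × Int)) (p), List.IsChain (fun a b => adj a b = true) (p :: (takeRunT adj p l).1) := by
  intro l
  induction l with
  | nil => intro p; simp [takeRunT]
  | cons q t ih =>
      intro p
      by_cases h : adj p q = true
      · simpa [takeRunT, h] using (List.IsChain.cons_cons (R := fun a b => adj a b = true) h (ih q))
      · simp [takeRunT, h]


lemma takeRunT_break (adj) : ∀ (l : List (Int × Int)) (p), ∀ x ∈ (p :: (takeRunT adj p l).1).getLast?, ∀ q ∈ (takeRunT adj p l).2.head?, adj x q = false := by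
  intro l
  induction l with
  | nil => intro p; simp [takeRunT]
  | cons q t ih =>
      intro p
      by_cases h : adj p q = true
      · intro x hx r hr
        have := ih q
        apply this <;> simp_all [takeRunT]
      · intro x hx r hr
        simp [takeRunT, h] at hx hr
        subst hx; subst hr
        simpa using h


lemma takeRunT_len (adj) : ∀ (l : List (Int × Int)) (p), (takeRunT adj p l).2.length ≤ l.length := by
  intro l
  induction l with
  | nil => intro p; simp [takeRunT]
  | cons q t ih =>
      intro p
      by_cases h : adj p q = true
      · simpa [takeRunT, h] using Nat.le_succ_of_le (ih q)
      · simp [takeRunT, h]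


lemma runsB_append_break : ∀ (T : List (Int × Int)) (s e : Int × Int) (S : List (Int × Int)),
    (∀ x ∈ (e :: T).getLast?, ∀ q ∈ S.head?, ¬ adj2 x q) →
    runsB s e (T ++ S) = runsB s e T ++ zonesRuns S := by
  intro T
  induction T with
  | nil =>
      intro s e S hbr
      cases S with
      | nil => simp [runsB, zonesRuns]
      | cons q S' =>
          have hb : ¬ adj2 e q := by simpa using hbr e (by simp) q (by simp)
          have hc : q.1 - e.1 ≠ 1 ∨ q.2 - e.2 ≠ 1 := by
            by_contra hcon
            push_neg at hcon
            exact hb ⟨by omega, by omega⟩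
          simp [runsB, if_pos hc, zonesRuns]
  | cons r T' ih =>
      intro s e S hbr
      have hlast : (e :: r :: T').getLast? = (r :: T').getLast? := by
        simp [List.getLast?_cons_cons]
      by_cases h : r.1 - e.1 ≠ 1 ∨ r.2 - e.2 ≠ 1
      · simp only [List.cons_append, runsB, if_pos h]
        rw [ih r r S (by intro x hx q hq; exact hbr x (by rw [hlast]; exact hx) q hq)]
      · simp only [List.cons_append, runsB, if_neg h]
        rw [ih s r S (by intro x hx q hq; exact hbr x (by rw [hlast]; exact hx) q hq)]


lemma runsB_run : ∀ (T : List (Int × Int)) (s e : Int × Int) (S : List (Int × Int)) (lastv : Int × Int),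
    (e :: T).getLast? = some lastv →
    List.IsChain adj2 (e :: T) →
    (∀ x ∈ (e :: T).getLast?, ∀ q ∈ S.head?, ¬ adj2 x q) →
    runsB s e (T ++ S) = (s, lastv) :: zonesRuns S := by
  intro T
  induction T with
  | nil =>
      intro s e S lastv hlast hch hbr
      simp at hlast
      subst hlast
      cases S with
      | nil => simp [runsB, zonesRuns]
      | cons q S' =>
          have hb : ¬ adj2 e q := by simpa using hbr e (by simp) q (by simp)
          have hc : q.1 - e.1 ≠ 1 ∨ q.2 - e.2 ≠ 1 := by
            by_contra hcon
            push_neg at hcon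
            exact hb ⟨by omega, by omega⟩
          simp [runsB, if_pos hc, zonesRuns]
  | cons r T' ih =>
      intro s e S lastv hlast hch hbr
      have hadj : adj2 e r := by
        rcases List.isChain_cons_cons.1 hch with ⟨h1, _⟩
        exact h1
      obtain ⟨ha1, ha2⟩ := hadj
      have hc : ¬ (r.1 - e.1 ≠ 1 ∨ r.2 - e.2 ≠ 1) := by
        push_neg
        exact ⟨by omega, by omega⟩
      have hlast' : (r :: T').getLast? = some lastv := by
        simpa [List.getLast?_cons_cons] using hlast
      have hch' : List.IsChain adj2 (r :: T') := (List.isChain_cons_cons.1 hch).2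
      simp only [List.cons_append, runsB, if_neg hc]
      exact ih s r S lastv hlast' hch' (by
        intro x hx q hq
        exact hbr x (by simpa [List.getLast?_cons_cons] using hx) q hq)


-- getRange: start-shift invariance and the run-peel lemma
lemma gr_enum_shift : ∀ (ys : List Int) (s c k f la : Int),
    getRangeAux (k + c) f la (PySem.List.enumerate ys (s + c)) = getRangeAux k f la (PySem.List.enumerate ys s) := by
  intro ys
  induction ys with
  | nil => intro s c k f la; simp [PySem.List.enumerate, getRangeAux]
  | cons y t ih =>
      intro s c k f la
      rw [PySem.List.enumerate_cons, PySem.List.enumerate_cons]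
      by_cases h : s - y = k
      · have h' : s + c - y = k + c := by omega
        simp only [getRangeAux, if_pos h, if_pos h']
        have e1 : s + c + 1 = (s + 1) + c := by ring
        rw [e1, ih]
      · have h' : ¬ (s + c - y = k + c) := by omega
        simp only [getRangeAux, if_neg h, if_neg h']
        have e1 : s + c + 1 = (s + 1) + c := by ring
        have e2 : s + c - y = (s - y) + c := by ring
        rw [e1, e2, ih]


lemma gr_aux_peel : ∀ (xs ys : List Int) (s first last lastv : Int),
    (last :: xs).getLast? = some lastv →
    List.IsChain (fun a b => b = a + 1) (last :: xs) →
    (∀ b ∈ ys.head?, b ≠ lastv + 1) →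
    getRangeAux (s - 1 - last) first last (PySem.List.enumerate (xs ++ ys) s)
      = (first, lastv) :: getRange ys := by
  intro xs
  induction xs with
  | nil =>
      intro ys s first last lastv hlast hch hbr
      simp at hlast
      subst hlast
      cases ys with
      | nil => simp [PySem.List.enumerate, getRangeAux, getRange]
      | cons y t =>
          have hy : y ≠ last + 1 := hbr y (by simp)
          have hc : ¬ (s - y = s - 1 - last) := by omega
          rw [List.nil_append, PySem.List.enumerate_cons]
          simp only [getRangeAux, if_neg hc]
          have hgr : getRange (y :: t) = getRangeAux (0 - y) y y (PySem.List.enumerate t 1) := by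
            simp [getRange, PySem.List.enumerate_cons]
          rw [hgr]
          have e1 : s - y = (0 - y) + s := by ring
          have e2 : s + 1 = 1 + s := by ring
          rw [e1, e2, gr_enum_shift]
  | cons x xs' ih =>
      intro ys s first last lastv hlast hch hbr
      have hx : x = last + 1 := (List.isChain_cons_cons.1 hch).1
      have hch' : List.IsChain (fun a b => b = a + 1) (x :: xs') := (List.isChain_cons_cons.1 hch).2
      have hlast' : (x :: xs').getLast? = some lastv := by
        simpa [List.getLast?_cons_cons] using hlast
      rw [List.cons_append, PySem.List.enumerate_cons]
      have hc : s - x = s - 1 - last := by omega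
      simp only [getRangeAux, if_pos hc]
      have e1 : s - 1 - last = (s + 1) - 1 - x := by omega
      rw [e1]
      exact ih ys (s + 1) first x lastv hlast' hch' hbr


lemma getRange_peel : ∀ (R ys : List Int) (h lastv : Int),
    R.head? = some h → R.getLast? = some lastv →
    List.IsChain (fun a b => b = a + 1) R →
    (∀ b ∈ ys.head?, b ≠ lastv + 1) →
    getRange (R ++ ys) = (h, lastv) :: getRange ys := by
  intro R ys h lastv hh hl hch hbr
  cases R with
  | nil => simp at hh
  | cons x xs =>
      simp at hh
      subst hh
      have hgr : getRange ((x :: xs) ++ ys) = getRangeAux (0 - x) x x (PySem.List.enumerate (xs ++ ys) 1) := by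
        simp [getRange, PySem.List.enumerate_cons]
      rw [hgr]
      have e1 : 0 - x = 1 - 1 - x := by ring
      rw [e1]
      exact gr_aux_peel xs ys 1 x x lastv hl hch hbr


lemma run_head_le_last : ∀ (R : List Int) (h lastv : Int),
    R.head? = some h → R.getLast? = some lastv →
    List.IsChain (fun a b => b = a + 1) R → h ≤ lastv := by
  intro R
  induction R with
  | nil => intro h lastv hh; simp at hh
  | cons x xs ih =>
      intro h lastv hh hl hch
      simp at hh
      subst hh
      cases xs with
      | nil => simp at hl; omega
      | cons y t =>
          have hy : y = x + 1 := (List.isChain_cons_cons.1 hch).1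
          have := ih y lastv (by simp) (by simpa [List.getLast?_cons_cons] using hl) (List.isChain_cons_cons.1 hch).2
          omega


lemma run_eq_pyRange : ∀ (R : List Int) (h lastv : Int),
    R.head? = some h → R.getLast? = some lastv →
    List.IsChain (fun a b => b = a + 1) R →
    R = PySem.List.pyRange h (lastv + 1) := by
  intro R
  induction R with
  | nil => intro h lastv hh; simp at hh
  | cons x xs ih =>
      intro h lastv hh hl hch
      simp at hh
      subst hh
      cases xs with
      | nil =>
          simp at hl
          subst hl
          simp [PySem.List.pyRange_one_singleton]
      | cons y t =>
          have hy : y = x + 1 := (List.isChain_cons_cons.1 hch).1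
          have hl' : (y :: t).getLast? = some lastv := by
            simpa [List.getLast?_cons_cons] using hl
          have hle : x ≤ lastv := run_head_le_last (x :: y :: t) x lastv (by simp) hl hch
          rw [PySem.List.pyRange_one_cons (by omega : x < lastv + 1)]
          have := ih y lastv (by simp) hl' (List.isChain_cons_cons.1 hch).2
          rw [← hy, ← this]


-- buildRef characterised as a filterMap over the deduplicated bound list
def refPairs (numbering_dic : List (String × List (Int × Int))) (chain : String) (bound_list : List Int) : List (Int × Int) :=
  (PySem.Set.ofList bound_list).filterMap (fun b => (lookupNum numbering_dic chain b).map (fun u => (b, u)))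

lemma mem_refPairs (n : List (String × List (Int × Int))) (chain : String) (bound : List Int) (p : Int × Int) :
    p ∈ refPairs n chain bound ↔ p.1 ∈ bound ∧ lookupNum n chain p.1 = some p.2 := by
  obtain ⟨pb, pu⟩ := p
  simp only [refPairs, List.mem_filterMap, Option.map_eq_some_iff, PySem.Set.mem_ofList, Prod.mk.injEq]
  constructor
  · rintro ⟨a, ha, u, hu, rfl, rfl⟩
    exact ⟨ha, hu⟩
  · rintro ⟨ha, hu⟩
    exact ⟨pb, ha, pu, hu, rfl, rfl⟩


lemma refPairs_fst (n : List (String × List (Int × Int))) (chain : String) (bound : List Int) :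
    (refPairs n chain bound).map Prod.fst = (PySem.Set.ofList bound).filter (fun b => (lookupNum n chain b).isSome) := by
  unfold refPairs
  generalize (PySem.Set.ofList bound : List Int) = l
  induction l with
  | nil => simp [List.filterMap]
  | cons b t ih =>
      cases hb : lookupNum n chain b with
      | none => simp [hb, ih]
      | some u => simp [hb, ih]


lemma refPairs_fst_nodup (n : List (String × List (Int × Int))) (chain : String) (bound : List Int) :
    ((refPairs n chain bound).map Prod.fst).Nodup := by
  rw [refPairs_fst]
  exact (PySem.Set.nodup_ofList bound).filter _


lemma buildRef_eq (n : List (String × List (Int × Int))) (chain : String) (bound : List Int) :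
    buildRef n chain bound = PySem.Dict.mk (refPairs n chain bound) := by
  induction bound using List.reverseRecOn with
  | nil => rfl
  | append_singleton bound b ih =>
      have hstep : buildRef n chain (bound ++ [b]) =
          (match lookupNum n chain b with
           | none => buildRef n chain bound
           | some ub => (buildRef n chain bound).insert b ub) := by
        simp [buildRef, List.foldl_append]
      rw [hstep, ih]
      cases hb : lookupNum n chain b with
      | none =>
          apply PySem.Dict.ext
          show refPairs n chain bound = refPairs n chain (bound ++ [b])
          unfold refPairs
          rw [PySem.Set.ofList_append_singleton]
          by_cases hmem : b ∈ PySem.Set.ofList bound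
          · rw [PySem.Set.add_of_mem hmem]
          · rw [PySem.Set.add_of_not_mem hmem, List.filterMap_append]
            simp [hb]
      | some u =>
          by_cases hmem : b ∈ PySem.Set.ofList bound
          · have hbP : (b, u) ∈ refPairs n chain bound :=
              (mem_refPairs n chain bound (b, u)).2 ⟨(PySem.Set.mem_ofList bound b).1 hmem, hb⟩
            have hcont : (PySem.Dict.mk (refPairs n chain bound)).contains b = true := by
              rw [PySem.Dict.contains_eq_decide_mem_keys]
              simp only [PySem.Dict.keys, decide_eq_true_eq]
              exact List.mem_map.2 ⟨(b, u), hbP, rfl⟩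
            apply PySem.Dict.ext
            rw [PySem.Dict.items_insert_of_contains _ u hcont]
            show (refPairs n chain bound).map _ = (PySem.Dict.mk (refPairs n chain (bound ++ [b]))).items
            have hsame : refPairs n chain (bound ++ [b]) = refPairs n chain bound := by
              unfold refPairs
              rw [PySem.Set.ofList_append_singleton, PySem.Set.add_of_mem hmem]
            rw [hsame]
            show (refPairs n chain bound).map (fun p => if (p.1 == b) = true then (b, u) else p) = refPairs n chain bound
            have : ∀ p ∈ refPairs n chain bound, (if (p.1 == b) = true then (b, u) else p) = p := by
              intro p hp
              by_cases hpb : p.1 = b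
              · obtain ⟨p1, p2⟩ := p
                simp only at hpb
                have hlk := ((mem_refPairs n chain bound (p1, p2)).1 hp).2
                simp only at hlk
                rw [hpb, hb] at hlk
                injection hlk with hu
                simp [hpb, hu]
              · simp [hpb]
            rw [List.map_congr_left this]
            simp
          · have hcont : (PySem.Dict.mk (refPairs n chain bound)).contains b = false := by
              rw [PySem.Dict.contains_eq_decide_mem_keys]
              simp only [PySem.Dict.keys, decide_eq_false_iff_not]
              intro hmemk
              obtain ⟨p, hp, hp1⟩ := List.mem_map.1 hmemk
              have := ((mem_refPairs n chain bound p).1 hp).1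
              rw [hp1] at this
              exact hmem ((PySem.Set.mem_ofList bound b).2 this)
            apply PySem.Dict.ext
            rw [PySem.Dict.items_insert_of_not_contains _ u hcont]
            show refPairs n chain bound ++ [(b, u)] = (PySem.Dict.mk (refPairs n chain (bound ++ [b]))).items
            show refPairs n chain bound ++ [(b, u)] = refPairs n chain (bound ++ [b])
            unfold refPairs
            rw [PySem.Set.ofList_append_singleton, PySem.Set.add_of_not_mem hmem, List.filterMap_append]
            simp [hb]


def adjKb (p q : Int × Int) : Bool := q.1 == p.1 + 1
def adj2b (p q : Int × Int) : Bool := (q.1 == p.1 + 1) && (q.2 == p.2 + 1)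

lemma adjKb_iff (p q : Int × Int) : adjKb p q = true ↔ adjK p q := by simp [adjKb, adjK]
lemma adj2b_iff (p q : Int × Int) : adj2b p q = true ↔ adj2 p q := by simp [adj2b, adj2]

-- the common zone of one run: bound start via reverse first-occurrence lookup, bound end
-- by extending while the looked-up keys stay consecutive
def gA (L : List (Int × Int)) (u : Int) : Int :=
  (L.map Prod.fst).getD ((PySem.List.index? (L.map Prod.snd) u).getD 0) 0

def prefRun : Int → List Int → Int
  | x, [] => x
  | x, y :: t => if y = x + 1 then prefRun y t else x

def zoneSpec (L : List (Int × Int)) (chain : String) (r : Int × Int) : String :=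
  pvZone chain (gA L r.1)
    (prefRun (gA L r.1) ((PySem.List.pyRange (r.1 + 1) (r.2 + 1)).map (gA L))) r.1 r.2

-- head of getRange is the end of the first maximal run
lemma grAux_head : ∀ (xs : List Int) (s f la : Int),
    (getRangeAux (s - 1 - la) f la (PySem.List.enumerate xs s)).headD (0, 0) = (f, prefRun la xs) := by
  intro xs
  induction xs with
  | nil => intro s f la; simp [PySem.List.enumerate, getRangeAux, prefRun]
  | cons y t ih =>
      intro s f la
      rw [PySem.List.enumerate_cons]
      by_cases h : y = la + 1
      · have hc : s - y = s - 1 - la := by omega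
        simp only [getRangeAux, if_pos hc]
        have e1 : s - 1 - la = (s + 1) - 1 - y := by omega
        rw [e1, ih]
        simp [prefRun, h]
      · have hc : ¬ (s - y = s - 1 - la) := by omega
        simp only [getRangeAux, if_neg hc]
        simp [prefRun, h]

lemma grHead (x : Int) (xs : List Int) : (getRange (x :: xs)).headD (0, 0) = (x, prefRun x xs) := by
  have hgr : getRange (x :: xs) = getRangeAux (0 - x) x x (PySem.List.enumerate xs 1) := by
    simp [getRange, PySem.List.enumerate_cons]
  rw [hgr, show (0 : Int) - x = 1 - 1 - x from by ring]
  exact grAux_head xs 1 x x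

-- A's reverse lookup keys[values.index(u)] is the first pair with value u
lemma gA_find? : ∀ (P : List (Int × Int)) (u : Int) (pr : Int × Int),
    P.find? (fun p => p.2 == u) = some pr → gA P u = pr.1 := by
  intro P
  induction P with
  | nil => intro u pr h; simp at h
  | cons q t ih =>
      intro u pr h
      by_cases hq : q.2 = u
      · rw [List.find?_cons_of_pos (by simpa using hq)] at h
        injection h with h
        subst h
        unfold gA
        simp only [List.map_cons]
        rw [show q.2 :: t.map Prod.snd = u :: t.map Prod.snd from by rw [hq]]
        rw [PySem.List.index?_cons_self]
        rfl
      · rw [List.find?_cons_of_neg (by simpa using hq)] at h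
        have hmem : pr ∈ t := List.mem_of_find?_eq_some h
        have hpr : pr.2 = u := by simpa using List.find?_some h
        have hsome : u ∈ t.map Prod.snd := List.mem_map.2 ⟨pr, hmem, hpr⟩
        obtain ⟨j, hj⟩ := Option.isSome_iff_exists.1 ((PySem.List.index?_isSome_iff (t.map Prod.snd) u).2 hsome)
        unfold gA
        simp only [List.map_cons]
        rw [PySem.List.index?_cons_of_ne (t.map Prod.snd) hq, hj]
        have := ih u pr h
        unfold gA at this
        rw [hj] at this
        simpa using this
  -- B's first_key dict holds the first pair with each value
lemma firstKey_go : ∀ (P : List (Int × Int)) (m : PySem.Dict Int Int) (u : Int),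
    (P.foldl (fun m p => if m.contains p.2 then m else m.insert p.2 p.1) m).get? u
      = if m.contains u then m.get? u else (P.find? (fun p => p.2 == u)).map Prod.fst := by
  intro P
  induction P with
  | nil =>
      intro m u
      by_cases hc : m.contains u = true
      · simp [hc]
      · simp only [Bool.not_eq_true] at hc
        simp [hc, (PySem.Dict.get?_eq_none_iff_contains m u).2 hc]
  | cons q t ih =>
      intro m u
      rw [List.foldl_cons]
      by_cases hcq : m.contains q.2 = true
      · rw [if_pos hcq, ih]
        by_cases hq : q.2 = u
        · have hcu : m.contains u = true := by rw [← hq]; exact hcq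
          simp [hcu]
        · rw [List.find?_cons_of_neg (by simpa using hq)]
      · rw [if_neg (by simp [hcq]), ih]
        by_cases hq : q.2 = u
        · subst hq
          have hcu : m.contains q.2 = false := by simpa using hcq
          rw [if_pos (by simp [PySem.Dict.contains_insert])]
          rw [if_neg (by simp [hcu]), List.find?_cons_of_pos (by simp)]
          simp [PySem.Dict.get?_insert_self]
        · have hci : (m.insert q.2 q.1).contains u = m.contains u := by
            rw [PySem.Dict.contains_insert]
            simp [show u ≠ q.2 from fun h => hq h.symm]
          rw [hci, PySem.Dict.get?_insert_of_ne m q.1 (fun (h : u = q.2) => hq h.symm)]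
          rw [List.find?_cons_of_neg (by simpa using hq)]

lemma firstKey_get? (P : List (Int × Int)) (u : Int) :
    (firstKey P).get? u = (P.find? (fun p => p.2 == u)).map Prod.fst := by
  unfold firstKey
  rw [firstKey_go]
  simp

lemma gA_mem (P : List (Int × Int)) (u : Int) (hu : u ∈ P.map Prod.snd) :
    (firstKey P).get? u = some (gA P u) := by
  obtain ⟨x, hx, hxu⟩ := List.mem_map.1 hu
  have hsome : (P.find? (fun p => p.2 == u)).isSome := by
    rw [List.find?_isSome]
    exact ⟨x, hx, by simpa using hxu⟩
  obtain ⟨pr, hpr⟩ := Option.isSome_iff_exists.1 hsome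
  rw [firstKey_get?, hpr, gA_find? P u pr hpr]
  rfl

-- every value inside an emitted run's interval occurs among the values V
lemma runsB_inv (V : List Int) : ∀ (l : List (Int × Int)) (s e : Int × Int),
    s.2 ≤ e.2 → (∀ u, s.2 ≤ u → u ≤ e.2 → u ∈ V) → (∀ x ∈ l, x.2 ∈ V) →
    ∀ r ∈ runsB s e l, r.1.2 ≤ r.2.2 ∧ ∀ u, r.1.2 ≤ u → u ≤ r.2.2 → u ∈ V := by
  intro l
  induction l with
  | nil =>
      intro s e hle hint _ r hr
      simp [runsB] at hr
      subst hr
      exact ⟨hle, hint⟩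
  | cons q t ih =>
      intro s e hle hint hl r hr
      by_cases h : q.1 - e.1 ≠ 1 ∨ q.2 - e.2 ≠ 1
      · rw [runsB, if_pos h] at hr
        rcases List.mem_cons.1 hr with rfl | hr'
        · exact ⟨hle, hint⟩
        · exact ih q q le_rfl
            (fun u h1 h2 => by
              have : u = q.2 := by omega
              rw [this]; exact hl q (List.mem_cons_self))
            (fun x hx => hl x (List.mem_cons_of_mem q hx)) r hr'
      · rw [runsB, if_neg h] at hr
        push_neg at h
        exact ih s q (by omega)
          (fun u h1 h2 => by
            by_cases hu : u ≤ e.2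
            · exact hint u h1 hu
            · have : u = q.2 := by omega
              rw [this]; exact hl q (List.mem_cons_self))
          (fun x hx => hl x (List.mem_cons_of_mem q hx)) r hr
-- B's run splitting is the (value-projected) run decomposition
lemma runsLoop_proj : ∀ (l : List (Int × Int)) (s e : Int × Int),
    runsLoop s.2 e.1 e.2 l = (runsB s e l).map (fun r => (r.1.2, r.2.2)) := by
  intro l
  induction l with
  | nil => intro s e; simp [runsLoop, runsB]
  | cons q t ih =>
      intro s e
      obtain ⟨b, u⟩ := q
      by_cases h : b - e.1 ≠ 1 ∨ u - e.2 ≠ 1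
      · simp only [runsLoop, runsB, if_pos h, List.map_cons]
        rw [show (u : Int) = ((b, u) : Int × Int).2 from rfl, show (b : Int) = ((b, u) : Int × Int).1 from rfl]
        rw [ih (b, u) (b, u)]
      · simp only [runsLoop, runsB, if_neg h]
        exact ih s (b, u)

-- B's while loop computes the same run end as A's get_range(...)[0]
lemma scan_eq : ∀ (P : List (Int × Int)) (k : Nat) (u ae : Int),
    (∀ v : Int, u + 1 ≤ v → v ≤ u + (k : Int) → v ∈ P.map Prod.snd) →
    scanEnd (firstKey P) ae u k
      = prefRun ae ((PySem.List.pyRange (u + 1) (u + 1 + (k : Int))).map (gA P)) := by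
  intro P k
  induction k with
  | zero =>
      intro u ae _
      simp [scanEnd, prefRun, PySem.List.pyRange_one_eq_nil]
  | succ k ih =>
      intro u ae hv
      have hlt : u + 1 < u + 1 + ((k : Int) + 1) := by omega
      rw [show ((Nat.succ k : Nat) : Int) = (k : Int) + 1 from by push_cast; ring]
      rw [PySem.List.pyRange_one_cons hlt, List.map_cons]
      have hmem : u + 1 ∈ P.map Prod.snd := hv (u + 1) le_rfl (by push_cast; omega)
      have hget := gA_mem P (u + 1) hmem
      by_cases hcond : gA P (u + 1) = ae + 1
      · rw [show scanEnd (firstKey P) ae u (Nat.succ k) = scanEnd (firstKey P) (ae + 1) (u + 1) k from by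
            simp [scanEnd, hget, hcond]]
        rw [show prefRun ae (gA P (u + 1) :: (PySem.List.pyRange (u + 1 + 1) (u + 1 + ((k : Int) + 1))).map (gA P))
              = prefRun (ae + 1) ((PySem.List.pyRange (u + 1 + 1) (u + 1 + ((k : Int) + 1))).map (gA P)) from by
            simp [prefRun, hcond]]
        rw [show u + 1 + ((k : Int) + 1) = (u + 1) + 1 + (k : Int) from by ring]
        exact ih (u + 1) (ae + 1) (fun v h1 h2 => hv v (by omega) (by push_cast; omega))
      · have hno : ¬ ((firstKey P).get? (u + 1) = some (ae + 1)) := by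
          rw [hget]
          simp [hcond]
        rw [show scanEnd (firstKey P) ae u (Nat.succ k) = ae from by simp [scanEnd, hno]]
        rw [show prefRun ae (gA P (u + 1) :: (PySem.List.pyRange (u + 1 + 1) (u + 1 + ((k : Int) + 1))).map (gA P)) = ae from by
            simp [prefRun, hcond]]

-- A's inner loop over one key-run K equals the run decomposition of K
lemma innerM : ∀ (nn : Nat) (L K : List (Int × Int)), K.length ≤ nn →
    List.IsChain adjK K →
    ∀ (chain : String) (acc : List String),
      (getRange (K.map Prod.snd)).foldl (bodyU (PySem.Dict.mk L) chain) acc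
        = acc ++ (zonesRuns K).map (fun r => zoneSpec L chain (r.1.2, r.2.2)) := by
  intro nn
  induction nn with
  | zero =>
      intro L K hlen _ chain acc
      have hnil : K = [] := by cases K with
        | nil => rfl
        | cons a b => simp at hlen
      subst hnil
      simp [getRange, PySem.List.enumerate, zonesRuns]
  | succ nn ih =>
      intro L K hlen hch chain acc
      cases K with
      | nil => simp [getRange, PySem.List.enumerate, zonesRuns]
      | cons p l =>
        set T' := (takeRunT adj2b p l).1 with hT'
        set K' := (takeRunT adj2b p l).2 with hKdef
        have happ : T' ++ K' = l := takeRunT_append adj2b l p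
        have hchb : List.IsChain (fun a b => adj2b a b = true) (p :: T') := takeRunT_chain adj2b l p
        have hch2 : List.IsChain adj2 (p :: T') := hchb.imp (fun a b h => (adj2b_iff a b).1 h)
        obtain ⟨lastv, hlast⟩ := Option.isSome_iff_exists.1 (List.getLast?_isSome.2 (List.cons_ne_nil p T'))
        have hbrkb := takeRunT_break adj2b l p
        have hbrk2 : ∀ q ∈ K'.head?, ¬ adj2 lastv q := by
          intro q hq hadj
          have hfalse := hbrkb lastv (by rw [hlast]; simp) q hq
          rw [← adj2b_iff lastv q] at hadj
          rw [hfalse] at hadj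
          exact Bool.false_ne_true hadj
        have hchK : List.IsChain adjK ((p :: T') ++ K') := by
          rw [List.cons_append, happ]; exact hch
        obtain ⟨hchKrun, hchKrest, hbd⟩ := List.isChain_append.1 hchK
        have hsndeq : (p :: l).map Prod.snd = ((p :: T').map Prod.snd) ++ (K'.map Prod.snd) := by
          rw [← List.map_append, List.cons_append, happ]
        have hchsnd : List.IsChain (fun a b => b = a + 1) ((p :: T').map Prod.snd) :=
          (List.isChain_map _).2 (hch2.imp (fun a b h => h.2))
        have hlastsnd : ((p :: T').map Prod.snd).getLast? = some lastv.2 := by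
          rw [List.getLast?_map, hlast]; rfl
        have hbrsnd : ∀ b ∈ (K'.map Prod.snd).head?, b ≠ lastv.2 + 1 := by
          intro b hb heq
          rw [List.head?_map] at hb
          cases hq : K'.head? with
          | none => rw [hq] at hb; simp at hb
          | some q =>
              rw [hq] at hb
              simp at hb
              have hadjK : adjK lastv q := hbd lastv (by rw [hlast]; simp) q (by rw [hq]; simp)
              exact hbrk2 q (by rw [hq]; simp) ⟨hadjK, by omega⟩
        have hpeel : getRange ((p :: l).map Prod.snd) = (p.2, lastv.2) :: getRange (K'.map Prod.snd) := by
          rw [hsndeq]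
          exact getRange_peel _ _ p.2 lastv.2 (by simp) hlastsnd hchsnd hbrsnd
        rw [hpeel, List.foldl_cons]
        have hle : p.2 ≤ lastv.2 :=
          run_head_le_last ((p :: T').map Prod.snd) p.2 lastv.2 (by simp) hlastsnd hchsnd
        have hbody : bodyU (PySem.Dict.mk L) chain acc (p.2, lastv.2) = acc ++ [zoneSpec L chain (p.2, lastv.2)] := by
          simp only [bodyU]
          rw [PySem.List.foldl_append_singleton_eq_map, List.nil_append]
          have hfun : (fun u => (PySem.Dict.mk L).keys.getD ((PySem.List.index? (PySem.Dict.mk L).values u).getD 0) 0) = gA L := by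
            funext u
            simp [gA, PySem.Dict.keys, PySem.Dict.values]
          rw [hfun]
          rw [PySem.List.pyRange_one_cons (by omega : p.2 < lastv.2 + 1), List.map_cons, grHead]
          rfl
        rw [hbody]
        have hlen' : K'.length ≤ nn := by
          have h1 := takeRunT_len adj2b l p
          rw [← hKdef] at h1
          simp at hlen
          omega
        rw [ih L K' hlen' hchKrest chain (acc ++ [zoneSpec L chain (p.2, lastv.2)])]
        have hzr : zonesRuns (p :: l) = (p, lastv) :: zonesRuns K' := by
          show runsB p p l = _
          rw [← happ]
          exact runsB_run T' p p K' lastv hlast hch2 (by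
            intro x hx q hq
            rw [hlast] at hx
            simp at hx
            subst hx
            exact hbrk2 q hq)
        rw [hzr]
        simp

-- A's outer loop over any block S of L equals the run decomposition of S
lemma outerM : ∀ (nn : Nat) (L S : List (Int × Int)), S.length ≤ nn →
    (L.map Prod.fst).Nodup →
    (∀ x ∈ S, x ∈ L) →
    ∀ (chain : String) (acc : List String),
      (getRange (S.map Prod.fst)).foldl (bodyK (PySem.Dict.mk L) chain) acc
        = acc ++ (zonesRuns S).map (fun r => zoneSpec L chain (r.1.2, r.2.2)) := by
  intro nn
  induction nn with
  | zero =>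
      intro L S hlen _ _ chain acc
      have hnil : S = [] := by cases S with
        | nil => rfl
        | cons a b => simp at hlen
      subst hnil
      simp [getRange, PySem.List.enumerate, zonesRuns]
  | succ nn ih =>
      intro L S hlen hK hsub chain acc
      cases S with
      | nil => simp [getRange, PySem.List.enumerate, zonesRuns]
      | cons p l =>
        set T' := (takeRunT adjKb p l).1 with hT'
        set K' := (takeRunT adjKb p l).2 with hKdef
        have happ : T' ++ K' = l := takeRunT_append adjKb l p
        have hchb : List.IsChain (fun a b => adjKb a b = true) (p :: T') := takeRunT_chain adjKb l p
        have hchKrun : List.IsChain adjK (p :: T') := hchb.imp (fun a b h => (adjKb_iff a b).1 h)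
        obtain ⟨lastv, hlast⟩ := Option.isSome_iff_exists.1 (List.getLast?_isSome.2 (List.cons_ne_nil p T'))
        have hbrkb := takeRunT_break adjKb l p
        have hbrkK : ∀ q ∈ K'.head?, ¬ adjK lastv q := by
          intro q hq hadj
          have hfalse := hbrkb lastv (by rw [hlast]; simp) q hq
          rw [← adjKb_iff lastv q] at hadj
          rw [hfalse] at hadj
          exact Bool.false_ne_true hadj
        have hmemL : ∀ x ∈ p :: T', x ∈ L := by
          intro x hx
          apply hsub
          have hx2 : x ∈ (p :: T') ++ K' := List.mem_append_left _ hx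
          rw [List.cons_append, happ] at hx2
          exact hx2
        have hfsteq : (p :: l).map Prod.fst = ((p :: T').map Prod.fst) ++ (K'.map Prod.fst) := by
          rw [← List.map_append, List.cons_append, happ]
        have hchfst : List.IsChain (fun a b => b = a + 1) ((p :: T').map Prod.fst) :=
          (List.isChain_map _).2 (hchKrun.imp (fun a b h => h))
        have hlastfst : ((p :: T').map Prod.fst).getLast? = some lastv.1 := by
          rw [List.getLast?_map, hlast]; rfl
        have hbrfst : ∀ b ∈ (K'.map Prod.fst).head?, b ≠ lastv.1 + 1 := by
          intro b hb heq
          rw [List.head?_map] at hb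
          cases hq : K'.head? with
          | none => rw [hq] at hb; simp at hb
          | some q =>
              rw [hq] at hb
              simp at hb
              exact hbrkK q (by rw [hq]; simp) (by rw [adjK]; omega)
        have hpeel : getRange ((p :: l).map Prod.fst) = (p.1, lastv.1) :: getRange (K'.map Prod.fst) := by
          rw [hfsteq]
          exact getRange_peel _ _ p.1 lastv.1 (by simp) hlastfst hchfst hbrfst
        rw [hpeel, List.foldl_cons]
        have hbody : bodyK (PySem.Dict.mk L) chain acc (p.1, lastv.1)
            = acc ++ (zonesRuns (p :: T')).map (fun r => zoneSpec L chain (r.1.2, r.2.2)) := by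
          simp only [bodyK]
          rw [PySem.List.foldl_append_singleton_eq_map, List.nil_append]
          have hrun : PySem.List.pyRange p.1 (lastv.1 + 1) = (p :: T').map Prod.fst :=
            (run_eq_pyRange _ _ _ (by simp) hlastfst hchfst).symm
          rw [hrun, List.map_map]
          have hmapsnd : ((p :: T').map ((fun b => (PySem.Dict.mk L).getD b 0) ∘ Prod.fst)) = (p :: T').map Prod.snd := by
            apply List.map_congr_left
            intro x hx
            show (PySem.Dict.mk L).getD x.1 0 = x.2
            have hmem : (x.1, x.2) ∈ (PySem.Dict.mk L).items := by
              show (x.1, x.2) ∈ L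
              simpa using hmemL x hx
            have hnd : (PySem.Dict.mk L).keys.Nodup := by
              simpa [PySem.Dict.keys] using hK
            exact PySem.Dict.getD_of_mem_items _ hmem hnd 0
          rw [hmapsnd]
          exact innerM (p :: T').length L (p :: T') le_rfl hchKrun chain acc
        rw [hbody]
        have hlen' : K'.length ≤ nn := by
          have h1 := takeRunT_len adjKb l p
          rw [← hKdef] at h1
          simp at hlen
          omega
        have hsubK' : ∀ x ∈ K', x ∈ L := by
          intro x hx
          apply hsub
          have hx2 : x ∈ (p :: T') ++ K' := List.mem_append_right _ hx
          rw [List.cons_append, happ] at hx2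
          exact hx2
        rw [ih L K' hlen' hK hsubK' chain (acc ++ (zonesRuns (p :: T')).map (fun r => zoneSpec L chain (r.1.2, r.2.2)))]
        have hzr : zonesRuns (p :: l) = zonesRuns (p :: T') ++ zonesRuns K' := by
          show runsB p p l = runsB p p T' ++ zonesRuns K'
          rw [← happ]
          exact runsB_append_break T' p p K' (by
            intro x hx q hq hadj
            rw [hlast] at hx
            simp at hx
            subst hx
            exact hbrkK q hq hadj.1)
        rw [hzr]
        simp

-- per-chain agreement: A's nested loops equal B's single pass plus first_key lookups
lemma chain_eq (n : List (String × List (Int × Int))) (chain : String) (bound : List Int)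
    (acc : List String) :
    (getRange (buildRef n chain bound).keys).foldl (bodyK (buildRef n chain bound) chain) acc
      = (match (buildRef n chain bound).items with
         | [] => acc
         | p :: rest =>
             (runsLoop p.2 p.1 p.2 rest).foldl (fun iz r =>
               iz ++ [pvZone chain ((firstKey (buildRef n chain bound).items).getD r.1 0)
                 (scanEnd (firstKey (buildRef n chain bound).items)
                   ((firstKey (buildRef n chain bound).items).getD r.1 0) r.1 (r.2 - r.1).toNat) r.1 r.2]) acc) := by
  rw [buildRef_eq]
  have hK := refPairs_fst_nodup n chain bound
  have hkeys : (PySem.Dict.mk (refPairs n chain bound)).keys = (refPairs n chain bound).map Prod.fst := by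
    simp [PySem.Dict.keys]
  rw [hkeys]
  rw [outerM (refPairs n chain bound).length (refPairs n chain bound) (refPairs n chain bound) le_rfl hK (fun x hx => hx) chain acc]
  generalize refPairs n chain bound = P
  cases P with
  | nil => exact List.append_nil acc
  | cons p rest =>
      show acc ++ ((runsB p p rest).map (fun r => zoneSpec (p :: rest) chain (r.1.2, r.2.2)))
        = (runsLoop p.2 p.1 p.2 rest).foldl (fun iz r =>
            iz ++ [pvZone chain ((firstKey (p :: rest)).getD r.1 0)
              (scanEnd (firstKey (p :: rest)) ((firstKey (p :: rest)).getD r.1 0) r.1 (r.2 - r.1).toNat) r.1 r.2]) acc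
      rw [runsLoop_proj rest p p]
      rw [PySem.List.foldl_append_singleton_eq_map, List.map_map]
      congr 1
      apply List.map_congr_left
      intro r hr
      obtain ⟨hle, hint⟩ := runsB_inv ((p :: rest).map Prod.snd) rest p p le_rfl
        (fun u h1 h2 => by
          have hu : u = p.2 := by omega
          rw [hu]
          exact List.mem_map_of_mem List.mem_cons_self)
        (fun x hx => List.mem_map_of_mem (List.mem_cons_of_mem p hx)) r hr
      have hua : r.1.2 ∈ (p :: rest).map Prod.snd := hint r.1.2 le_rfl hle
      have ha0 : (firstKey (p :: rest)).getD r.1.2 0 = gA (p :: rest) r.1.2 :=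
        PySem.Dict.getD_of_get?_eq_some _ 0 (gA_mem (p :: rest) r.1.2 hua)
      have hk : (((r.2.2 - r.1.2).toNat : Nat) : Int) = r.2.2 - r.1.2 := Int.toNat_of_nonneg (by omega)
      have hscan := scan_eq (p :: rest) (r.2.2 - r.1.2).toNat r.1.2 (gA (p :: rest) r.1.2)
        (fun v h1 h2 => hint v (by omega) (by rw [hk] at h2; omega))
      rw [hk] at hscan
      rw [show r.1.2 + 1 + (r.2.2 - r.1.2) = r.2.2 + 1 from by ring] at hscan
      show zoneSpec (p :: rest) chain (r.1.2, r.2.2)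
        = pvZone chain ((firstKey (p :: rest)).getD r.1.2 0)
            (scanEnd (firstKey (p :: rest)) ((firstKey (p :: rest)).getD r.1.2 0) r.1.2 (r.2.2 - r.1.2).toNat) r.1.2 r.2.2
      rw [ha0, hscan]
      rfl

-- ===== VERDICT (by name: the statement is the Claim_ definition above) =====
theorem retrieve_izone_spec : Claim_equal_retrieve_izone := by
  intro c n hdom hpre
  show retrieve_izone c n = retrieve_izone_alt c n
  unfold retrieve_izone retrieve_izone_alt
  apply PySem.List.foldl_congr_mem
  intro acc ci hci
  exact chain_eq n ci.1 ((PySem.Dict.ofList ci.2).items.headD ("", [])).2 acc
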